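-- pv_equiv track=rewrite | github.com/dawoodaijaz97/Leetcode | find-sum-of-array-product-of-magical-sequences/solution.py | solve
-- ===== SOURCE A (Python) =====
-- MOD = 10**9 + 7
--
-- def solve(m: int, k: int, nums: list[int]) -> int:
--     from itertools import combinations_with_replacement
--     from functools import reduce
--     from operator import mul
--
--     def count_set_bits(n: int) -> int:
--         return bin(n).count('1')
--
--     total_sum = 0
--     for seq in combinations_with_replacement(range(len(nums)), m):
--         if count_set_bits(sum(1 << i for i in seq)) == k:
--             product = reduce(mul, (nums[i] for i in seq), 1)
--             total_sum = (total_sum + product) % MOD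
--
--     return total_sum
-- ===== SOURCE B (Python) =====
-- MOD = 10**9 + 7
--
-- def solve(m: int, k: int, nums: list[int]) -> int:
--     n = len(nums)
--
--     def rec(i: int, rem: int, s: int, prod: int) -> int:
--         if i == n:
--             return prod % MOD if rem == 0 and bin(s).count('1') == k else 0
--         total = 0
--         for c in range(rem + 1):
--             total = (total + rec(i + 1, rem - c, s + (c << i), prod * nums[i] ** c)) % MOD
--         return total
--
--     return rec(0, m, 0, 1)
-- ===== Notes on version B (the rewrite author's own statement) =====
-- stated objective: alternative
-- what changed: B replaces A's itertools enumeration of all index multisets (each tuple summed and multiplied out in O(m)) by a backtracking recursion that picks the multiplicity of each index once, accumulating the bit-sum and product incrementally and reducing mod 1e9+7 as it goes.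
import Mathlib
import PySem

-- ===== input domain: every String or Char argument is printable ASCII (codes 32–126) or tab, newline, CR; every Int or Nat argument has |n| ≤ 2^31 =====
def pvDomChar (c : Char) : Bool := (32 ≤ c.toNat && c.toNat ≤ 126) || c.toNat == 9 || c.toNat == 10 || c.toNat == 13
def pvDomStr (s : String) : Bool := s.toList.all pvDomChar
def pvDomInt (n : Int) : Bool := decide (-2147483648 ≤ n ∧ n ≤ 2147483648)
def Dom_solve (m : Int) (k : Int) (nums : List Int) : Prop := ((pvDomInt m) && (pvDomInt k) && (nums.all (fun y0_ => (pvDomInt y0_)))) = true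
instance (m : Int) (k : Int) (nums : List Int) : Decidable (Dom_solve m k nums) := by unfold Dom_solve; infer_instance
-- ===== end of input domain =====

-- B replaces A's enumeration of all index multisets (itertools tuples, each summed and
-- multiplied out in O(m)) by a backtracking recursion over positions choosing the
-- multiplicity of each index once, accumulating the bit-sum and the product incrementally.

-- ===== PORT A =====
def pvMOD : Int := 1000000007

-- bin(n).count('1') for n ≥ 0
def popcount (n : Nat) : Nat :=
  if n = 0 then 0 else n % 2 + popcount (n / 2)
decreasing_by exact Nat.div_lt_self (Nat.pos_of_ne_zero (by assumption)) (by decide)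

-- itertools.combinations_with_replacement over a (sorted) candidate list, lexicographic
def cwr {α : Type} : List α → Nat → List (List α)
  | _, 0 => [[]]
  | [], _ + 1 => []
  | x :: xs, m + 1 => ((cwr (x :: xs) m).map (fun s => x :: s)) ++ cwr xs (m + 1)
termination_by xs m => (m, xs.length)

def solve (m : Int) (k : Int) (nums : List Int) : Int :=
  (cwr (List.range nums.length) m.toNat).foldl
    (fun tot seq =>
      if ((popcount ((seq.map (fun i => (2:Nat) ^ i)).sum) : Int) = k) then
        (tot + seq.foldl (fun p i => p * nums.getD i 0) 1) % pvMOD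
      else tot) 0

-- ===== PORT B =====
-- rec(i, rem, s, prod) from Source B; the list argument is nums[i:], sh is i
def brec (k : Int) : List Int → Int → Nat → Nat → Int → Int
  | [], rem, _, s, prod =>
      if rem = 0 ∧ (popcount s : Int) = k then prod % pvMOD else 0
  | x :: xs, rem, sh, s, prod =>
      (PySem.List.pyRange 0 (rem + 1) 1).foldl
        (fun t c =>
          (t + brec k xs (rem - c) (sh + 1) (s + c.toNat * 2 ^ sh) (prod * x ^ c.toNat)) % pvMOD)
        0

def solve_alt (m : Int) (k : Int) (nums : List Int) : Int :=
  brec k nums m 0 0 1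

-- ===== PRECONDITION & SPEC =====
-- A raises ValueError (itertools refuses a negative r) when m < 0; Pre_ excludes exactly that.
def Pre_solve (m : Int) (k : Int) (nums : List Int) : Prop := 0 ≤ m
instance (m : Int) (k : Int) (nums : List Int) : Decidable (Pre_solve m k nums) := by unfold Pre_solve; infer_instance
def pvWitness_solve : Int × Int × List Int := (2, 1, [3, 5])

def Spec_solve (m : Int) (k : Int) (nums : List Int) (out : Int) : Prop := out = solve_alt m k nums
instance (m : Int) (k : Int) (nums : List Int) (out : Int) : Decidable (Spec_solve m k nums out) := by unfold Spec_solve; infer_instance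

-- ===== CLAIM (what is proved, stated in full; the proofs are below) =====
def Claim_equal_solve : Prop := ∀ (m : Int) (k : Int) (nums : List Int), Dom_solve m k nums → Pre_solve m k nums → Spec_solve m k nums (solve m k nums)

-- ===== LEMMAS AND PROOFS =====

-- the A-side term: contribution of one multiset (as an index list)
def termA (k : Int) (val : Nat → Int) (s : Nat) (prod : Int) (seq : List Nat) : Int :=
  if ((popcount (s + (seq.map (fun i => (2:Nat) ^ i)).sum) : Int) = k) then
    prod * (seq.map val).prod
  else 0

def SA (k : Int) (val : Nat → Int) (idxs : List Nat) (m : Nat) (s : Nat) (prod : Int) : Int :=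
  ((cwr idxs m).map (termA k val s prod)).sum

lemma pvMOD_pos : (0:Int) < pvMOD := by norm_num [pvMOD]

lemma emod_add_left (a b : Int) : (a % pvMOD + b) % pvMOD = (a + b) % pvMOD := by
  conv_rhs => rw [Int.add_emod]
  rw [Int.add_emod (a % pvMOD) b, Int.emod_emod_of_dvd a dvd_rfl]

-- A's running fold with interleaved % equals the plain sum mod pvMOD
lemma foldA_eq (nums : List Int) (k : Int) (L : List (List Nat)) :
    ∀ t0 : Int, 0 ≤ t0 → t0 < pvMOD →
    L.foldl (fun tot seq =>
      if ((popcount ((seq.map (fun i => (2:Nat) ^ i)).sum) : Int) = k) then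
        (tot + seq.foldl (fun p i => p * nums.getD i 0) 1) % pvMOD
      else tot) t0
    = (t0 + (L.map (termA k (fun i => nums.getD i 0) 0 1)).sum) % pvMOD := by
  induction L with
  | nil => intro t0 h0 h1; simp [Int.emod_eq_of_lt h0 h1]
  | cons seq L ih =>
    intro t0 h0 h1
    simp only [List.foldl_cons, List.map_cons, List.sum_cons]
    have hprod : seq.foldl (fun p i => p * nums.getD i 0) 1
        = (seq.map (fun i => nums.getD i 0)).prod := by
      rw [List.prod_eq_foldl, List.foldl_map]
    by_cases hc : ((popcount ((seq.map (fun i => (2:Nat) ^ i)).sum) : Int) = k)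
    · rw [if_pos hc]
      rw [ih _ (Int.emod_nonneg _ (by norm_num [pvMOD])) (Int.emod_lt_of_pos _ pvMOD_pos)]
      rw [emod_add_left]
      have ht : termA k (fun i => nums.getD i 0) 0 1 seq
          = seq.foldl (fun p i => p * nums.getD i 0) 1 := by
        unfold termA
        rw [if_pos (by simpa using hc), hprod, one_mul]
      rw [ht, add_assoc]
    · rw [if_neg hc, ih _ h0 h1]
      have ht : termA k (fun i => nums.getD i 0) 0 1 seq = 0 := by
        unfold termA
        rw [if_neg (by simpa using hc)]
      rw [ht, zero_add]

-- B's inner fold with interleaved % equals the plain sum mod pvMOD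
lemma foldB_eq (f : Nat → Int) (L : List Nat) :
    ∀ t0 : Int, 0 ≤ t0 → t0 < pvMOD →
    L.foldl (fun t c => (t + f c) % pvMOD) t0 = (t0 + (L.map f).sum) % pvMOD := by
  induction L with
  | nil => intro t0 h0 h1; simp [Int.emod_eq_of_lt h0 h1]
  | cons c L ih =>
    intro t0 h0 h1
    simp only [List.foldl_cons, List.map_cons, List.sum_cons]
    rw [ih _ (Int.emod_nonneg _ (by norm_num [pvMOD])) (Int.emod_lt_of_pos _ pvMOD_pos)]
    rw [emod_add_left, add_assoc]

-- sum of reduced terms mod = sum of terms mod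
lemma sum_map_emod (f : Nat → Int) (L : List Nat) :
    ((L.map (fun c => f c % pvMOD)).sum) % pvMOD = ((L.map f).sum) % pvMOD := by
  induction L with
  | nil => rfl
  | cons c L ih =>
    simp only [List.map_cons, List.sum_cons]
    rw [emod_add_left, Int.add_emod, ih, ← Int.add_emod]

lemma cwr_nil_succ {α : Type} (m : Nat) : cwr ([] : List α) (m + 1) = [] := by
  rw [cwr]

lemma cwr_cons_succ {α : Type} (x : α) (xs : List α) (m : Nat) :
    cwr (x :: xs) (m + 1) = ((cwr (x :: xs) m).map (fun s => x :: s)) ++ cwr xs (m + 1) := by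
  rw [cwr]

lemma cwr_zero {α : Type} (l : List α) : cwr l 0 = [[]] := by
  cases l <;> rw [cwr]

-- decomposition of the cwr sum by the multiplicity of the head candidate
lemma cwr_sum_decomp {α : Type} (x : α) (xs : List α) (F : List α → Int) (m : Nat) :
    ((cwr (x :: xs) m).map F).sum
      = ((List.range (m + 1)).map
          (fun c => ((cwr xs (m - c)).map (fun seq => F (List.replicate c x ++ seq))).sum)).sum := by
  induction m generalizing F with
  | zero => simp [cwr_zero]
  | succ m ih =>
    rw [cwr_cons_succ, List.map_append, List.sum_append, List.map_map]
    have ih' := ih (fun seq => F (x :: seq))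
    rw [show (F ∘ fun s => x :: s) = fun seq => F (x :: seq) from rfl, ih']
    conv_rhs => rw [List.range_succ_eq_map]
    rw [List.map_cons, List.sum_cons, List.map_map]
    rw [add_comm]
    congr 2
    apply List.map_congr_left
    intro c _
    have h1 : m + 1 - (c + 1) = m - c := by omega
    simp only [Function.comp_apply, Nat.succ_eq_add_one, h1, List.replicate_succ, List.cons_append]

lemma termA_replicate (k : Int) (val : Nat → Int) (s : Nat) (prod : Int) (c sh : Nat) (seq : List Nat) :
    termA k val s prod (List.replicate c sh ++ seq)
      = termA k val (s + c * 2 ^ sh) (prod * (val sh) ^ c) seq := by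
  unfold termA
  have h1 : ((List.replicate c sh ++ seq).map (fun i => (2:Nat) ^ i)).sum
      = c * 2 ^ sh + (seq.map (fun i => (2:Nat) ^ i)).sum := by
    simp [List.sum_replicate]
  have h2 : ((List.replicate c sh ++ seq).map val).prod
      = (val sh) ^ c * (seq.map val).prod := by
    simp [List.prod_replicate]
  rw [h1, h2, ← Nat.add_assoc, mul_assoc]

lemma pyRange_toNat_succ (r : Int) (h : 0 ≤ r) :
    PySem.List.pyRange 0 (r + 1) 1 = List.map Int.ofNat (List.range (r.toNat + 1)) := by
  rw [PySem.List.pyRange_one]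
  have h2 : (r + 1 - 0).toNat = r.toNat + 1 := by omega
  rw [h2]
  exact List.map_congr_left (fun a _ => by rw [Int.ofNat_eq_natCast]; omega)

-- MAIN: B's recursion computes the A-side sum over multisets of the remaining indices
lemma brec_eq_SA (k : Int) (val : Nat → Int) :
    ∀ (xs : List Int) (sh : Nat) (rem : Int) (s : Nat) (prod : Int),
    0 ≤ rem → (∀ j (h : j < xs.length), xs[j] = val (sh + j)) →
    brec k xs rem sh s prod = (SA k val (List.range' sh xs.length) rem.toNat s prod) % pvMOD := by
  intro xs
  induction xs with
  | nil =>
    intro sh rem s prod hrem _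
    by_cases h0 : rem = 0
    · subst h0
      by_cases hps : (popcount s : Int) = k
      · simp [brec, SA, cwr_zero, termA, hps]
      · simp [brec, SA, cwr_zero, termA, hps]
    · have hp : (0:Int) < rem := lt_of_le_of_ne hrem (Ne.symm h0)
      have h1 : rem.toNat = (rem.toNat - 1) + 1 := by omega
      simp only [brec, SA, List.length_nil, List.range'_zero]
      rw [h1, cwr_nil_succ]
      simp [h0]
  | cons x xs ih =>
    intro sh rem s prod hrem hval
    have hx : x = val sh := by simpa using hval 0 (by simp)
    rw [show brec k (x :: xs) rem sh s prod
        = (PySem.List.pyRange 0 (rem + 1) 1).foldl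
            (fun t c => (t + brec k xs (rem - c) (sh + 1) (s + c.toNat * 2 ^ sh) (prod * x ^ c.toNat)) % pvMOD) 0
      from rfl]
    rw [pyRange_toNat_succ rem hrem, List.foldl_map]
    rw [foldB_eq (fun c => brec k xs (rem - Int.ofNat c) (sh + 1) (s + (Int.ofNat c).toNat * 2 ^ sh) (prod * x ^ (Int.ofNat c).toNat))
        (List.range (rem.toNat + 1)) 0 le_rfl pvMOD_pos]
    have hstep : ∀ c ∈ List.range (rem.toNat + 1),
        brec k xs (rem - Int.ofNat c) (sh + 1) (s + (Int.ofNat c).toNat * 2 ^ sh) (prod * x ^ (Int.ofNat c).toNat)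
          = (SA k val (List.range' (sh + 1) xs.length) (rem.toNat - c) (s + c * 2 ^ sh) (prod * (val sh) ^ c)) % pvMOD := by
      intro c hc
      rw [List.mem_range] at hc
      have h1 : (Int.ofNat c).toNat = c := rfl
      have h2 : (rem - Int.ofNat c).toNat = rem.toNat - c := by
        rw [Int.ofNat_eq_natCast]; omega
      rw [ih (sh + 1) (rem - Int.ofNat c) _ _ (by rw [Int.ofNat_eq_natCast]; omega)
        (by intro j hj
            have := hval (j + 1) (by simpa using Nat.succ_lt_succ hj)
            simpa [Nat.add_assoc, Nat.add_comm 1 j] using this)]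
      rw [h1, h2, hx]
    rw [List.map_congr_left hstep, zero_add]
    rw [sum_map_emod (fun c => SA k val (List.range' (sh + 1) xs.length) (rem.toNat - c) (s + c * 2 ^ sh) (prod * val sh ^ c)) (List.range (rem.toNat + 1))]
    congr 1
    rw [show (x :: xs).length = xs.length + 1 from rfl, List.range'_succ]
    unfold SA
    rw [cwr_sum_decomp sh (List.range' (sh + 1) xs.length) (termA k val s prod) rem.toNat]
    congr 1
    apply List.map_congr_left
    intro c _
    congr 1
    apply List.map_congr_left
    intro seq _
    exact (termA_replicate k val s prod c sh seq).symm

-- ===== VERDICT (by name: the statement is the Claim_ definition above) =====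
theorem solve_spec : Claim_equal_solve := by
  intro m k nums _ hpre
  unfold Spec_solve solve solve_alt
  rw [foldA_eq nums k _ 0 le_rfl pvMOD_pos]
  rw [brec_eq_SA k (fun i => nums.getD i 0) nums 0 m 0 1 hpre
    (by intro j hj
        simp [List.getD_eq_getElem?_getD, List.getElem?_eq_getElem hj])]
  rw [zero_add]
  unfold SA
  rw [List.range_eq_range']
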